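-- pv_equiv track=rewrite | github.com/SamoKopecky/ssltest | SSLTest/src/scan_parameters/connections/connection_utils.py | worst_or_best_protocol
-- ===== SOURCE A (Python) =====
-- def worst_or_best_protocol(protocols, worst):
--     """
--     Find either the best or worst protocol to connect with
--
--     :param list protocols: Supported protocols by the server
--     :param bool worst: Whether to find worst available protocol or best
--     :return: The string of the chosen protocol
--     :rtype: str
--     """
--     protocol_strengths = {
--         'TLSv1.3': 5,
--         'TLSv1.2': 4,
--         'TLSv1.1': 3,
--         'TLSv1.0': 2,
--         'SSLv3': 1,
--         'SSLv2': 0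
--     }
--     items = list(protocol_strengths.items())
--     # If worst option is False the best SSL protocol is found
--     # If worst option is True the worst protocol is found, in other words the minimum value is found
--     switcher = {
--         True: (lambda a, b: a < b, items[0]),
--         False: (lambda a, b: a > b, items[-1])
--     }
--     # Filter out the unsupported protocols
--     filtered_protocol_strengths = dict(filter(lambda item: item[0] in protocols, protocol_strengths.items()))
--     comparison = switcher[worst][0]
--     base = switcher[worst][1]
--     for key, value in filtered_protocol_strengths.items():
--         if comparison(value, base[1]):
--             base = (key, value)
--     return base[0]
-- ===== SOURCE B (Python) =====
-- _ORDER = ['TLSv1.3', 'TLSv1.2', 'TLSv1.1', 'TLSv1.0', 'SSLv3', 'SSLv2']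
--
--
-- def worst_or_best_protocol(protocols, worst):
--     order = _ORDER[::-1] if worst else _ORDER
--     for protocol in order:
--         if protocol in protocols:
--             return protocol
--     return 'TLSv1.3' if worst else 'SSLv2'
-- ===== Notes on version B (the rewrite author's own statement) =====
-- stated objective: idiomatic
-- what changed: Replaces the strength-dict filter plus running min/max comparison loop with a fixed strongest-to-weakest list scanned for the first supported protocol (reversed for worst), with A's seed value as the no-match default.
import Mathlib
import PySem

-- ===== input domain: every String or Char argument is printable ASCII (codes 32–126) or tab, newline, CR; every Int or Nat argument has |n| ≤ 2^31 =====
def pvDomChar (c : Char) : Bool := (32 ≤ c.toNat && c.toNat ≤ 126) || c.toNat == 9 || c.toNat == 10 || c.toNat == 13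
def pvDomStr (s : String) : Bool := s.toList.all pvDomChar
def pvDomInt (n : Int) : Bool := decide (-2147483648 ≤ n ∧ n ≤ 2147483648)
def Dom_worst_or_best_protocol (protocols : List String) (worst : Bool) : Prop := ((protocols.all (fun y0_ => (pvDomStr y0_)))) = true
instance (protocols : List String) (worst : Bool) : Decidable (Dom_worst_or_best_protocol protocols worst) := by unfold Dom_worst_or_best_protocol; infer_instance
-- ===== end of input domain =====

-- B replaces A's strength-dict filter + running min/max loop by a first-match scan
-- of a fixed strongest-to-weakest list (idiomatic decomposition; same cost).

-- ===== PORT A =====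
-- the dict protocol_strengths in insertion order
def pvStrengths : List (String × Int) :=
  [("TLSv1.3", 5), ("TLSv1.2", 4), ("TLSv1.1", 3), ("TLSv1.0", 2), ("SSLv3", 1), ("SSLv2", 0)]

def worst_or_best_protocol (protocols : List String) (worst : Bool) : String :=
  -- switcher[worst] = (comparison, base): items[0] with (<) for True, items[-1] with (>) for False
  let base0 : String × Int := if worst then pvStrengths.head! else pvStrengths.getLast!
  -- filtered_protocol_strengths keeps dict order, only supported keys
  let filtered := pvStrengths.filter (fun item => protocols.contains item.1)
  let base := filtered.foldl
    (fun base kv => if (if worst then kv.2 < base.2 else kv.2 > base.2) then kv else base) base0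
  base.1

-- ===== PORT B =====
def pvOrder : List String := ["TLSv1.3", "TLSv1.2", "TLSv1.1", "TLSv1.0", "SSLv3", "SSLv2"]

def worst_or_best_protocol_alt (protocols : List String) (worst : Bool) : String :=
  let order := if worst then pvOrder.reverse else pvOrder
  match order.find? (fun p => protocols.contains p) with
  | some p => p
  | none => if worst then "TLSv1.3" else "SSLv2"

-- ===== PRECONDITION & SPEC =====
def Spec_worst_or_best_protocol (protocols : List String) (worst : Bool) (out : String) : Prop := out = worst_or_best_protocol_alt protocols worst
instance (protocols : List String) (worst : Bool) (out : String) : Decidable (Spec_worst_or_best_protocol protocols worst out) := by unfold Spec_worst_or_best_protocol; infer_instance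

-- ===== CLAIM (what is proved, stated in full; the proofs are below) =====
def Claim_equal_worst_or_best_protocol : Prop := ∀ (protocols : List String) (worst : Bool), Dom_worst_or_best_protocol protocols worst → Spec_worst_or_best_protocol protocols worst (worst_or_best_protocol protocols worst)

-- ===== LEMMAS AND PROOFS =====

-- ===== VERDICT (by name: the statement is the Claim_ definition above) =====
theorem worst_or_best_protocol_spec : Claim_equal_worst_or_best_protocol := by
  intro protocols worst _
  unfold Spec_worst_or_best_protocol worst_or_best_protocol worst_or_best_protocol_alt
  by_cases h1 : "TLSv1.3" ∈ protocols <;>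
  by_cases h2 : "TLSv1.2" ∈ protocols <;>
  by_cases h3 : "TLSv1.1" ∈ protocols <;>
  by_cases h4 : "TLSv1.0" ∈ protocols <;>
  by_cases h5 : "SSLv3" ∈ protocols <;>
  by_cases h6 : "SSLv2" ∈ protocols <;>
  cases worst <;>
  simp [pvStrengths, pvOrder, List.filter, List.find?, List.foldl, h1, h2, h3, h4, h5, h6]
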